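-- pv_equiv track=rewrite | github.com/pulp-platform/ara | apps/load_test/scripts/datagen.py | check_segments
-- ===== SOURCE A (Python) =====
-- def check_segments(seg_data, vec_length, segment_size):
--     list_arr = []
--
--     for seg in range(segment_size):
--         list_arr.append([])
--
--     for idx in range(vec_length):
--         for current_seg in range(segment_size):
--             list_arr[current_seg].append(seg_data[idx*segment_size+current_seg])
--
--     return list_arr
-- ===== SOURCE B (Python) =====
-- def check_segments(seg_data, vec_length, segment_size):
--     # chunk the flat data into vec_length rows of segment_size, then transpose
--     rows = [seg_data[i * segment_size:(i + 1) * segment_size] for i in range(vec_length)]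
--     return [[row[seg] for row in rows] for seg in range(segment_size)]
-- ===== Notes on version B (the rewrite author's own statement) =====
-- stated objective: simpler
-- what changed: A allocates empty buckets and scatters each element into its bucket with a fused double loop over a mutable list-of-lists; B instead slices the flat data into per-index rows and transposes them column by column, with no index arithmetic or in-place mutation in the output pass.
import Mathlib
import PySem

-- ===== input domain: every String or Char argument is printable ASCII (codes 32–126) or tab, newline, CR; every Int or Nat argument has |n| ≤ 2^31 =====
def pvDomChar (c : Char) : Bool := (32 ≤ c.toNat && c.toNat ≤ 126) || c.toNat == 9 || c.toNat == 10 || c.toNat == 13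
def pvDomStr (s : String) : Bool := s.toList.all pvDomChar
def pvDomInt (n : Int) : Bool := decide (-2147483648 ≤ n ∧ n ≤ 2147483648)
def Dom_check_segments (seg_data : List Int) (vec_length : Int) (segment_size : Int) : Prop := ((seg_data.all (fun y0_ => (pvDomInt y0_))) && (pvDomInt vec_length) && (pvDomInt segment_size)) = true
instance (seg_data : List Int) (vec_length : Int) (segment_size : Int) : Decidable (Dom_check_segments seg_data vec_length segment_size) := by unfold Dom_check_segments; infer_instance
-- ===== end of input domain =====

-- B replaces A's bucket-allocate-and-scatter double loop (in-place appends driven by index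
-- arithmetic) by a chunk-into-rows-then-transpose decomposition; objective: simpler.


-- ===== PORT A =====
-- literal transliteration of A: build segment_size empty buckets, then for each idx append
-- seg_data[idx*segment_size+current_seg] to bucket current_seg.
-- seg_data[...] is PySem.List.pyGetD with default 0: inside Pre_ every index is in range,
-- so the default is never used (outside Pre_ the Python raises IndexError).
-- cs.toNat is exact because cs comes from range(segment_size), hence 0 ≤ cs.
def check_segments (seg_data : List Int) (vec_length : Int) (segment_size : Int) : List (List Int) :=
  let list_arr : List (List Int) :=
    (PySem.List.pyRange 0 segment_size).foldl (fun acc _ => acc ++ [[]]) []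
  (PySem.List.pyRange 0 vec_length).foldl (fun arr idx =>
    (PySem.List.pyRange 0 segment_size).foldl (fun arr cs =>
      arr.modify cs.toNat (fun l => l ++ [PySem.List.pyGetD seg_data (idx * segment_size + cs) 0])) arr)
    list_arr

-- ===== PORT B =====
-- literal transliteration of B: slice into rows, then transpose column by column.
-- row[seg] is PySem.List.pyGetD with default 0: inside Pre_ every row has length
-- segment_size > seg, so the default is never used (outside Pre_ the Python raises IndexError).
def check_segments_alt (seg_data : List Int) (vec_length : Int) (segment_size : Int) : List (List Int) :=
  let rows : List (List Int) :=
    (PySem.List.pyRange 0 vec_length).map (fun i =>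
      PySem.List.slice seg_data (some (i * segment_size)) (some ((i + 1) * segment_size)))
  (PySem.List.pyRange 0 segment_size).map (fun seg =>
    rows.map (fun row => PySem.List.pyGetD row seg 0))

-- ===== PRECONDITION & SPEC =====
-- Pre_ excludes exactly the inputs where Python A raises IndexError: vec_length and
-- segment_size positive but seg_data shorter than vec_length*segment_size (B raises there too).
def Pre_check_segments (seg_data : List Int) (vec_length : Int) (segment_size : Int) : Prop :=
  0 < vec_length → 0 < segment_size → vec_length * segment_size ≤ (seg_data.length : Int)
instance (seg_data : List Int) (vec_length : Int) (segment_size : Int) : Decidable (Pre_check_segments seg_data vec_length segment_size) := by unfold Pre_check_segments; infer_instance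

def pvWitness_check_segments : List Int × Int × Int := ([1, 2, 3, 4, 5, 6], 2, 3)

def Spec_check_segments (seg_data : List Int) (vec_length : Int) (segment_size : Int) (out : List (List Int)) : Prop := out = check_segments_alt seg_data vec_length segment_size
instance (seg_data : List Int) (vec_length : Int) (segment_size : Int) (out : List (List Int)) : Decidable (Spec_check_segments seg_data vec_length segment_size out) := by unfold Spec_check_segments; infer_instance

-- ===== CLAIM (what is proved, stated in full; the proofs are below) =====
def Claim_equal_check_segments : Prop := ∀ (seg_data : List Int) (vec_length : Int) (segment_size : Int), Dom_check_segments seg_data vec_length segment_size → Pre_check_segments seg_data vec_length segment_size → Spec_check_segments seg_data vec_length segment_size (check_segments seg_data vec_length segment_size)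

-- ===== LEMMAS AND PROOFS =====

lemma le_or_lt' (a b : Int) : a ≤ b ∨ b < a := by omega

-- appending a constant empty bucket per loop iteration builds a replicate
lemma const_append_loop (l : List Nat) (acc : List (List Int)) :
    l.foldl (fun a _ => a ++ [[]]) acc = acc ++ List.replicate l.length ([] : List Int) := by
  induction l generalizing acc with
  | nil => simp
  | cons x xs ih => simp [ih, List.replicate_succ]

-- the inner loop appends F to each of the first m buckets
lemma inner_loop (m : Nat) (F : Nat → Int) (arr : List (List Int)) :
    (List.range m).foldl (fun a j => a.modify j (fun l => l ++ [F j])) arr =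
      (List.range arr.length).map (fun s => if s < m then arr[s]! ++ [F s] else arr[s]!) := by
  induction m with
  | zero =>
      simp only [List.range_zero, List.foldl_nil, Nat.not_lt_zero, if_false]
      apply List.ext_getElem
      · simp
      · intro s h1 h2
        have hs : s < arr.length := by simpa using h2
        simp [List.getElem!_eq_getElem?_getD, List.getElem?_eq_getElem hs]
  | succ m ih =>
      rw [List.range_succ, List.foldl_append, ih]
      apply List.ext_getElem
      · simp [List.length_modify]
      · intro s h1 h2
        simp only [List.foldl_cons, List.foldl_nil]
        rw [List.getElem_modify]
        simp only [List.getElem_map, List.getElem_range]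
        have hs : s < arr.length := by simpa using h2
        by_cases hm : m = s
        · subst hm
          simp [List.getElem!_eq_getElem?_getD, List.getElem?_eq_getElem hs]
        · have : (s < m + 1) = (s < m) := by
            apply propext; constructor <;> intro <;> omega
          simp [hm, this]

-- after k outer iterations each bucket s < m holds the first k column-s elements
lemma outer_loop (m : Nat) (G : Nat → Nat → Int) (k : Nat) :
    (List.range k).foldl (fun arr i =>
        (List.range m).foldl (fun a j => a.modify j (fun l => l ++ [G i j])) arr)
      (List.replicate m ([] : List Int)) =
      (List.range m).map (fun s => (List.range k).map (fun i => G i s)) := by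
  induction k with
  | zero =>
      apply List.ext_getElem <;> simp
  | succ k ih =>
      rw [List.range_succ, List.foldl_append, ih]
      simp only [List.foldl_cons, List.foldl_nil]
      rw [inner_loop]
      apply List.ext_getElem
      · simp
      · intro s h1 h2
        have hs : s < m := by simpa using h1
        simp [hs, List.getElem!_eq_getElem?_getD]

theorem check_segments_spec : Claim_equal_check_segments := by
  intro seg_data vec_length segment_size _ hpre
  unfold Spec_check_segments check_segments check_segments_alt
  rcases le_or_lt' vec_length 0 with hv | hv
  · -- no data rows: A returns the empty buckets, B returns empty columns
    have hr : PySem.List.pyRange 0 vec_length = [] := by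
      simp [PySem.List.pyRange]; omega
    simp only [hr, List.foldl_nil, List.map_nil,
      PySem.List.foldl_append_singleton_eq_map]
    apply List.ext_getElem <;> simp
  rcases le_or_lt' segment_size 0 with hm | hm
  · have hr : PySem.List.pyRange 0 segment_size = [] := by
      simp [PySem.List.pyRange]; omega
    simp [hr]
  · -- main case: both sides equal the column matrix
    set n := vec_length.toNat with hn
    set m := segment_size.toNat with hm'
    have hvc : vec_length = (n : Int) := by omega
    have hmc : segment_size = (m : Int) := by omega
    have hlen : n * m ≤ seg_data.length := by
      have h := hpre hv hm
      rw [hvc, hmc] at h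
      exact_mod_cast h
    rw [hvc, hmc]
    simp only [PySem.List.pyRange_zero_natCast, List.foldl_map, List.map_map,
      Int.toNat_natCast]
    rw [const_append_loop, List.length_range, List.nil_append, outer_loop]
    apply List.map_congr_left
    intro s hsm
    have hs : s < m := List.mem_range.mp hsm
    apply List.map_congr_left
    intro i hin
    have hi : i < n := List.mem_range.mp hin
    simp only [Function.comp_apply]
    have hcast : ((i : Int) + 1) * (m : Int) = ((i * m : Nat) : Int) + ((m : Nat) : Int) := by
      push_cast; ring
    have hcast2 : (i : Int) * (m : Int) = ((i * m : Nat) : Int) := by push_cast; ring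
    rw [hcast, hcast2, PySem.List.slice_natCast_add]
    have hidx : ((i * m : Nat) : Int) + (s : Int) = ((i * m + s : Nat) : Int) := by
      push_cast; ring
    rw [hidx, PySem.List.pyGetD_natCast, PySem.List.pyGetD_natCast]
    have hbound : i * m + s < seg_data.length := by
      have h1 : i + 1 ≤ n := hi
      have : (i + 1) * m ≤ n * m := Nat.mul_le_mul_right m h1
      have : i * m + s < (i + 1) * m := by
        rw [Nat.succ_mul]; omega
      omega
    have hdlen : s < (seg_data.drop (i * m)).length := by
      simp; omega
    rw [List.getD_eq_getElem?_getD, List.getD_eq_getElem?_getD,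
      List.getElem?_eq_getElem hbound,
      List.getElem?_eq_getElem (by simp [List.length_take, List.length_drop]; omega :
        s < ((seg_data.drop (i * m)).take m).length)]
    simp [List.getElem_take, List.getElem_drop]
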